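-- pv_equiv track=rewrite | github.com/namitha89/python_works | shortest_distance_to_a_character.py | getDistanceIndex
-- ===== SOURCE A (Python) =====
-- def getDistanceIndex(s):
--     out = []
--     for i in range(len(s)):
--         str = s[i:]
--         res = str.find(c)
--         if(res == -1):
--             out.append(99999)
--         else:
--             out.append(res)
--     return out
--
-- c = 'e'
-- ===== SOURCE B (Python) =====
-- def getDistanceIndex(s):
--     out = []
--     d = None
--     for ch in reversed(s):
--         if ch == 'e':
--             d = 0
--         elif d is not None:
--             d = d + 1
--         out.append(99999 if d is None else d)
--     out.reverse()
--     return out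
-- ===== Notes on version B (the rewrite author's own statement) =====
-- stated objective: faster
-- what changed: replaced the per-index suffix scan (slice + find for every position) by a single right-to-left pass carrying the distance to the most recently seen target character
import Mathlib
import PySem

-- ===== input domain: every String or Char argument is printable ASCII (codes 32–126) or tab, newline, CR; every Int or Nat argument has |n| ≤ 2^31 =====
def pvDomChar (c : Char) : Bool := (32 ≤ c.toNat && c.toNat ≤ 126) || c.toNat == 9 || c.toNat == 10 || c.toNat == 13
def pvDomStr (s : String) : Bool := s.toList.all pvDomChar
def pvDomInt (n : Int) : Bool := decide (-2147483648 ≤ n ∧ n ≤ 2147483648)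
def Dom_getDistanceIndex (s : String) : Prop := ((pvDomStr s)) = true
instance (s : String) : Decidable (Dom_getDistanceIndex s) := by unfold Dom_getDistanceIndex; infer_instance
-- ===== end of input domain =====

-- B replaces A's per-index suffix scan by one right-to-left pass tracking the distance
-- to the most recently seen target character (objective: faster; measured).

-- ===== PORT A =====
-- for i in range(len(s)): str = s[i:]; res = str.find('e'); append 99999 if res == -1 else res
def getDistanceIndex (s : String) : List Int :=
  (PySem.List.pyRange 0 (PySem.Str.len s) 1).foldl
    (fun out i =>
      let str := PySem.Str.slice s (some i) none
      let res := PySem.Str.find str "e"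
      if res = -1 then out ++ [(99999 : Int)] else out ++ [res]) []

-- ===== PORT B =====
-- d = None; for ch in reversed(s): if ch=='e': d=0 elif d is not None: d=d+1; out.append(99999 if d is None else d); out.reverse()
def getDistanceIndex_alt (s : String) : List Int :=
  let st := s.toList.reverse.foldl
    (fun (st : Option Int × List Int) ch =>
      let d := if ch = 'e' then some (0 : Int)
               else if st.1.isSome then st.1.map (· + 1) else st.1
      (d, st.2 ++ [d.getD 99999])) (none, [])
  st.2.reverse

-- ===== PRECONDITION & SPEC =====
def Spec_getDistanceIndex (s : String) (out : List Int) : Prop := out = getDistanceIndex_alt s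
instance (s : String) (out : List Int) : Decidable (Spec_getDistanceIndex s out) := by unfold Spec_getDistanceIndex; infer_instance

-- ===== CLAIM (what is proved, stated in full; the proofs are below) =====
def Claim_equal_getDistanceIndex : Prop := ∀ (s : String), Dom_getDistanceIndex s → Spec_getDistanceIndex s (getDistanceIndex s)

-- ===== LEMMAS AND PROOFS =====

-- value A appends for the suffix c'
def aG (c' : List Char) : Int :=
  if PySem.Chars.find c' ['e'] = -1 then 99999 else PySem.Chars.find c' ['e']

-- A's output as a map over suffixes
def aMap (cs : List Char) : List Int :=
  (List.range cs.length).map (fun k => aG (cs.drop k))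

-- B's loop as structural recursion (foldl over the reversed list)
def phi : List Char → Option Int × List Int
  | [] => (none, [])
  | ch :: rest =>
    let p := phi rest
    let d := if ch = 'e' then some (0 : Int)
             else if p.1.isSome then p.1.map (· + 1) else p.1
    (d, p.2 ++ [d.getD 99999])

lemma foldl_ite_snoc {α : Type} (r : α → Int) :
    ∀ (l : List α) (init : List Int),
      List.foldl (fun out i => if r i = -1 then out ++ [(99999 : Int)] else out ++ [r i]) init l
        = init ++ l.map (fun i => if r i = -1 then (99999 : Int) else r i) := by
  intro l
  induction l with
  | nil => intro init; simp
  | cons x t ih =>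
    intro init
    by_cases hx : r x = -1 <;> simp [hx, ih]

lemma strG (s : String) (k : Nat) :
    PySem.Str.find (PySem.Str.slice s (some (k : Int)) none) "e"
      = PySem.Chars.find (s.toList.drop k) ['e'] := by
  have h : PySem.Str.slice s (some (k : Int)) none
      = String.ofList (PySem.Chars.slice s.toList (some (k : Int)) none) := by
    simp [PySem.Str.slice]
  rw [h]
  have h2 : PySem.Chars.slice s.toList (some (k : Int)) none
      = s.toList.drop k := PySem.List.slice_from_natCast s.toList k
  rw [h2]
  simp

lemma A_eq_aMap (s : String) : getDistanceIndex s = aMap s.toList := by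
  unfold getDistanceIndex aMap
  rw [PySem.Str.len_eq, PySem.List.pyRange_zero_natCast, List.foldl_map]
  have := foldl_ite_snoc
    (fun k : Nat => PySem.Str.find (PySem.Str.slice s (some (k : Int)) none) "e")
    (List.range s.toList.length) []
  rw [this]
  simp only [List.nil_append]
  apply List.map_congr_left
  intro k _
  rw [strG s k]
  rfl

lemma aMap_cons (ch : Char) (rest : List Char) :
    aMap (ch :: rest) = aG (ch :: rest) :: aMap rest := by
  unfold aMap
  rw [List.length_cons, List.range_succ_eq_map]
  simp [List.map_map, Function.comp_def]

lemma find_nil_e : PySem.Chars.find [] ['e'] = -1 := by decide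

lemma go_shift (t : List Char) :
    ∀ k : Nat, PySem.Chars.find.go ['e'] t k
      = if PySem.Chars.find.go ['e'] t 0 = -1 then -1
        else PySem.Chars.find.go ['e'] t 0 + k := by
  induction t with
  | nil =>
    intro k
    rw [PySem.Chars.find.go]
    rw [PySem.Chars.find.go]
    simp
  | cons h t ih =>
    intro k
    simp only [PySem.Chars.find.go]
    by_cases hp : (['e'].isPrefixOf (h :: t)) = true
    · simp [hp]
    · simp only [hp, if_neg, Bool.not_eq_true] at *
      have hge : -1 ≤ PySem.Chars.find.go ['e'] t 0 :=
        PySem.Chars.neg_one_le_find t ['e']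
      rw [ih (k + 1), ih 1]
      by_cases h0 : PySem.Chars.find.go ['e'] t 0 = -1
      · simp [h0]
      · simp only [h0, if_false]
        split_ifs with h1
        · omega
        · push_cast
          ring

lemma find_cons (ch : Char) (rest : List Char) :
    PySem.Chars.find (ch :: rest) ['e']
      = if ch = 'e' then 0
        else if PySem.Chars.find rest ['e'] = -1 then -1
        else PySem.Chars.find rest ['e'] + 1 := by
  show PySem.Chars.find.go ['e'] (ch :: rest) 0 = _
  simp only [PySem.Chars.find.go]
  have hpre : (['e'].isPrefixOf (ch :: rest)) = (ch = 'e' : Bool) := by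
    by_cases h : ch = 'e'
    · simp [List.isPrefixOf, h]
    · simp [List.isPrefixOf, h, Ne.symm h]
  rw [hpre, go_shift rest 1]
  by_cases h : ch = 'e' <;> simp [h]
  rfl

lemma neg_one_le_find' (t : List Char) : -1 ≤ PySem.Chars.find t ['e'] :=
  PySem.Chars.neg_one_le_find t ['e']

lemma phi_fst (cs : List Char) :
    (phi cs).1 = if PySem.Chars.find cs ['e'] = -1 then none
                 else some (PySem.Chars.find cs ['e']) := by
  induction cs with
  | nil => simp [phi, find_nil_e]
  | cons ch rest ih =>
    simp only [phi]
    rw [find_cons]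
    by_cases h : ch = 'e'
    · simp [h]
    · have hge := neg_one_le_find' rest
      by_cases h0 : PySem.Chars.find rest ['e'] = -1
      · simp [h, h0, ih]
      · have : ¬ PySem.Chars.find rest ['e'] + 1 = -1 := by omega
        simp [h, h0, ih, this]

lemma phi_snd (cs : List Char) : (phi cs).2.reverse = aMap cs := by
  induction cs with
  | nil => simp [phi, aMap]
  | cons ch rest ih =>
    rw [aMap_cons]
    simp only [phi, List.reverse_append, List.reverse_cons, List.reverse_nil,
      List.nil_append, List.cons_append]
    rw [ih]
    congr 1
    have hfst := phi_fst (ch :: rest)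
    simp only [phi] at hfst
    rw [hfst]
    unfold aG
    by_cases h0 : PySem.Chars.find (ch :: rest) ['e'] = -1 <;> simp [h0]

lemma B_eq_phi (cs : List Char) :
    cs.reverse.foldl
      (fun (st : Option Int × List Int) ch =>
        let d := if ch = 'e' then some (0 : Int)
                 else if st.1.isSome then st.1.map (· + 1) else st.1
        (d, st.2 ++ [d.getD 99999])) (none, [])
      = phi cs := by
  induction cs with
  | nil => simp [phi]
  | cons ch rest ih =>
    rw [List.reverse_cons, List.foldl_append, ih]
    simp [phi]

-- ===== VERDICT (by name: the statement is the Claim_ definition above) =====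
theorem getDistanceIndex_spec : Claim_equal_getDistanceIndex := by
  intro s _
  unfold Spec_getDistanceIndex getDistanceIndex_alt
  rw [B_eq_phi s.toList, phi_snd, A_eq_aMap]
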